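-- pv_equiv track=rewrite | github.com/AragornOfKebroyd/Github-Chess | scripts/state_to_grid.py | generate_image_grid_standalone
-- ===== SOURCE A (Python) =====
-- FEN_TO_NAME = {
--     # Black Pieces (Piece Type + 'd' for Dark/Black color)
--     'k': 'kd',
--     'q': 'qd',
--     'r': 'rd',
--     'b': 'bd',
--     'n': 'nd',
--     'p': 'pd',
--
--     # White Pieces (Piece Type + 'l' for Light/White color)
--     'K': 'kl',
--     'Q': 'ql',
--     'R': 'rl',
--     'B': 'bl',
--     'N': 'nl',
--     'P': 'pl',
-- }
--
-- EMPTY_LIGHT = 'el.png'  # For an empty light square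
--
-- EMPTY_DARK = 'ed.png'   # For an empty dark square
--
-- def is_dark_square(file_index: int, rank_index: int) -> bool:
--     """
--     Determines if a square is dark based on its coordinates.
--     Standard convention: (File + Rank) is EVEN for a Dark square.
--     (File A=0, Rank 1=0, up to File H=7, Rank 8=7)
--     """
--     # Sum the zero-indexed file and rank. A1 = 0+0 = 0 (Dark if A1 is Dark)
--     # The standard convention for an 8x8 grid is that squares where the sum of
--     # the coordinates is EVEN are one color, and ODD is the other.
--     # We'll assume the common visual layout where A1 is Dark.
--     return (file_index + rank_index) % 2 == 0
--
-- def generate_image_grid_standalone(fen_string):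
--     """
--     Converts a FEN string into an 8x8 grid of image filenames without the chess module.
--     """
--     # 1. Strip the FEN to just the piece placement data
--     pieces_fen = fen_string.split(' ')[0]
--
--     image_grid = []
--
--     # Initialize rank and file indices
--     current_rank_index = 7 # Start at Rank 8
--
--     # The FEN string iterates over the board row-by-row (Rank 8 down to Rank 1)
--     for rank_fen_string in pieces_fen.split('/'):
--         rank_images = []
--         current_file_index = 0 # Start at File A
--
--         # 2. Parse the FEN string for the current rank
--         for char in rank_fen_string:
--             if char.isdigit():
--                 # Encountered a number: Skip empty squares
--                 empty_count = int(char)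
--                 for _ in range(empty_count):
--                     # Determine background color for the empty square
--                     is_dark = is_dark_square(current_file_index, current_rank_index)
--                     bg_suffix = 'd' if is_dark else 'l'
--
--                     filename = EMPTY_DARK if is_dark else EMPTY_LIGHT
--                     rank_images.append(filename)
--                     current_file_index += 1
--
--             elif char.isalpha():
--                 # Encountered a piece character
--                 is_dark = is_dark_square(current_file_index, current_rank_index)
--                 bg_suffix = 'd' if is_dark else 'l'
--
--                 # Get the 2-letter piece/color prefix (e.g., 'kd', 'ql')
--                 prefix = FEN_TO_NAME.get(char)
--
--                 if prefix:
--                     filename = f"{prefix}{bg_suffix}.png"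
--                 else:
--                     filename = f"unknown_{bg_suffix}.png"
--
--                 rank_images.append(filename)
--                 current_file_index += 1
--
--         image_grid.append(rank_images)
--         current_rank_index -= 1 # Move down to the next rank (7 -> 6, etc.)
--
--     return image_grid
-- ===== SOURCE B (Python) =====
-- FEN_TO_NAME = {
--     'k': 'kd', 'q': 'qd', 'r': 'rd', 'b': 'bd', 'n': 'nd', 'p': 'pd',
--     'K': 'kl', 'Q': 'ql', 'R': 'rl', 'B': 'bl', 'N': 'nl', 'P': 'pl',
-- }
--
-- EMPTY_LIGHT = 'el.png'
-- EMPTY_DARK = 'ed.png'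
--
--
-- def generate_image_grid_standalone(fen_string):
--     """Two-pass version: parse the FEN into a board of optional piece chars,
--     then render each cell to a filename in a separate pass."""
--     ranks = fen_string.split(' ')[0].split('/')
--
--     # Pass 1: expand each rank into a list of cells (None = empty square).
--     board = []
--     for rank_fen in ranks:
--         cells = []
--         for ch in rank_fen:
--             if ch.isdigit():
--                 cells.extend([None] * int(ch))
--             elif ch.isalpha():
--                 cells.append(ch)
--         board.append(cells)
--
--     # Pass 2: render every cell, colouring from its coordinates.
--     grid = []
--     for row_number, cells in enumerate(board):
--         rank_index = 7 - row_number
--         rendered = []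
--         for file_index, cell in enumerate(cells):
--             dark = (file_index + rank_index) % 2 == 0
--             suffix = 'd' if dark else 'l'
--             if cell is None:
--                 rendered.append(EMPTY_DARK if dark else EMPTY_LIGHT)
--             else:
--                 prefix = FEN_TO_NAME.get(cell)
--                 rendered.append(f"{prefix}{suffix}.png" if prefix else f"unknown_{suffix}.png")
--         grid.append(rendered)
--     return grid
-- ===== Notes on version B (the rewrite author's own statement) =====
-- stated objective: alternative
-- what changed: Replaced A's single interleaved pass (mutable file/rank counters updated while parsing FEN characters, with a nested loop per digit) by two separate passes: first expand the FEN into an 8xN board of optional piece characters, then render every cell from its coordinates computed by enumerate.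
import Mathlib
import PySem

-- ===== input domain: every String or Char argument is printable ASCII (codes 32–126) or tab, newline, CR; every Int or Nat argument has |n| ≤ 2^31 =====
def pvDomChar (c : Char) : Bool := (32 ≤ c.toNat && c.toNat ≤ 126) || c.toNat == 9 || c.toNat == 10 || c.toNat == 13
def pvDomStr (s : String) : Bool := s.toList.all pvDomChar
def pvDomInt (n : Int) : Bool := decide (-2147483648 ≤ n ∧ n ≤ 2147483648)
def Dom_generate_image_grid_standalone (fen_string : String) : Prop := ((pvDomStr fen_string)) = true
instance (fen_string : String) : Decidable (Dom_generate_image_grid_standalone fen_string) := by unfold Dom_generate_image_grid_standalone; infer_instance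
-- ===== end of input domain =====

-- B replaces A's single interleaved pass with mutable counters by two separate passes
-- (expand the FEN into a board of optional piece chars, then render each cell from its
-- coordinates); objective: alternative decomposition, same complexity.

-- ===== PORT A =====
-- module constant FEN_TO_NAME (shared by both Python files)
def pvFenToName : PySem.Dict Char String :=
  PySem.Dict.ofList
    [('k', "kd"), ('q', "qd"), ('r', "rd"), ('b', "bd"), ('n', "nd"), ('p', "pd"),
     ('K', "kl"), ('Q', "ql"), ('R', "rl"), ('B', "bl"), ('N', "nl"), ('P', "pl")]

-- is_dark_square (A's helper; Python `%` on divisor 2 is PySem.Int.mod)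
def pvIsDarkSquare (file_index : Int) (rank_index : Int) : Bool :=
  PySem.Int.mod (file_index + rank_index) 2 == 0

-- A's inner `for char in rank_fen_string` loop body; state = (rank_images, current_file_index).
-- `int(char)` is guarded by `isdigit`, where `(PySem.Int.ofChars? [ch]).getD 0` is exact
-- (an ASCII digit always parses; PySem isdigit is the ASCII-exact char isdigit).
def pvAStep (current_rank_index : Int) (st : List String × Int) (ch : Char) : List String × Int :=
  if PySem.Chars.isdigit ch then
    let empty_count : Int := (PySem.Int.ofChars? [ch]).getD 0
    (PySem.List.pyRange 0 empty_count 1).foldl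
      (fun st _ =>
        let is_dark := pvIsDarkSquare st.2 current_rank_index
        let filename := if is_dark then "ed.png" else "el.png"
        (st.1 ++ [filename], st.2 + 1)) st
  else if PySem.Chars.isalpha ch then
    let is_dark := pvIsDarkSquare st.2 current_rank_index
    let bg_suffix := if is_dark then "d" else "l"
    let filename :=
      match pvFenToName.get? ch with      -- `if prefix:` — every stored name is non-empty
      | some pre => pre ++ bg_suffix ++ ".png"
      | none => "unknown_" ++ bg_suffix ++ ".png"
    (st.1 ++ [filename], st.2 + 1)
  else st

def generate_image_grid_standalone (fen_string : String) : List (List String) :=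
  let pieces_fen := ((PySem.Str.split? fen_string " ").getD []).headD ""  -- split(' ')[0]
  let res :=
    ((PySem.Str.split? pieces_fen "/").getD []).foldl
      (fun (acc : List (List String) × Int) rank_fen_string =>
        let rank_images :=
          (rank_fen_string.toList.foldl (pvAStep acc.2) ([], 0)).1
        (acc.1 ++ [rank_images], acc.2 - 1))
      ([], 7)
  res.1

-- ===== PORT B =====
-- pass 1 body: expand one rank into cells (none = empty square)
def pvBExpandStep (cells : List (Option Char)) (ch : Char) : List (Option Char) :=
  if PySem.Chars.isdigit ch then
    cells ++ List.replicate ((PySem.Int.ofChars? [ch]).getD 0).toNat none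
  else if PySem.Chars.isalpha ch then cells ++ [some ch]
  else cells

-- pass 2 body: render one cell from its coordinates
def pvBRender (rank_index : Int) (p : Int × Option Char) : String :=
  let dark := PySem.Int.mod (p.1 + rank_index) 2 == 0
  let suffix := if dark then "d" else "l"
  match p.2 with
  | none => if dark then "ed.png" else "el.png"
  | some c =>
    match pvFenToName.get? c with
    | some pre => pre ++ suffix ++ ".png"
    | none => "unknown_" ++ suffix ++ ".png"

def generate_image_grid_standalone_alt (fen_string : String) : List (List String) :=
  let ranks := (PySem.Str.split? (((PySem.Str.split? fen_string " ").getD []).headD "") "/").getD []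
  let board := ranks.map (fun rank_fen => rank_fen.toList.foldl pvBExpandStep [])
  (PySem.List.enumerate board 0).map (fun rowp =>
    let rank_index : Int := 7 - rowp.1
    (PySem.List.enumerate rowp.2 0).map (pvBRender rank_index))

-- ===== PRECONDITION & SPEC =====
def Spec_generate_image_grid_standalone (fen_string : String) (out : List (List String)) : Prop := out = generate_image_grid_standalone_alt fen_string
instance (fen_string : String) (out : List (List String)) : Decidable (Spec_generate_image_grid_standalone fen_string out) := by unfold Spec_generate_image_grid_standalone; infer_instance

-- ===== CLAIM (what is proved, stated in full; the proofs are below) =====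
def Claim_equal_generate_image_grid_standalone : Prop := ∀ (fen_string : String), Dom_generate_image_grid_standalone fen_string → Spec_generate_image_grid_standalone fen_string (generate_image_grid_standalone fen_string)

-- ===== LEMMAS AND PROOFS =====

-- what one rank character contributes to B's expanded board
def pvCellsOf (ch : Char) : List (Option Char) :=
  if PySem.Chars.isdigit ch then
    List.replicate ((PySem.Int.ofChars? [ch]).getD 0).toNat none
  else if PySem.Chars.isalpha ch then [some ch] else []

theorem pvBExpandStep_eq (cells : List (Option Char)) (ch : Char) :
    pvBExpandStep cells ch = cells ++ pvCellsOf ch := by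
  simp [pvBExpandStep, pvCellsOf]; split_ifs <;> simp

theorem pvBExpand_aux (cs : List Char) :
    ∀ acc, cs.foldl pvBExpandStep acc = acc ++ cs.flatMap pvCellsOf := by
  induction cs with
  | nil => intro acc; simp
  | cons c cs ih =>
    intro acc
    rw [List.foldl_cons, pvBExpandStep_eq, ih, List.flatMap_cons, List.append_assoc]

theorem pvBExpand_eq (cs : List Char) :
    cs.foldl pvBExpandStep [] = cs.flatMap pvCellsOf := by
  simpa using pvBExpand_aux cs []

-- range(int(c)) and replicate int(c) agree also when the count is ≤ 0
theorem pvPyRange_toNat (v : Int) :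
    PySem.List.pyRange 0 v 1 = PySem.List.pyRange 0 (v.toNat : Int) 1 := by
  by_cases h : v ≤ 0
  · rw [PySem.List.pyRange_one_eq_nil h, PySem.List.pyRange_one_eq_nil (by omega)]
  · congr 1; omega

-- A's empty-squares loop = rendering a run of `none` cells
theorem pvA_empty_loop_nat (r : Int) (n : Nat) :
    ∀ (imgs : List String) (f : Int),
      (PySem.List.pyRange 0 (n : Int) 1).foldl
        (fun st (_ : Int) =>
          let is_dark := pvIsDarkSquare st.2 r
          let filename := if is_dark then "ed.png" else "el.png"
          (st.1 ++ [filename], st.2 + 1)) (imgs, f)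
      = (imgs ++ (PySem.List.enumerate (List.replicate n (none : Option Char)) f).map (pvBRender r),
         f + n) := by
  induction n with
  | zero => intro imgs f; simp [PySem.List.pyRange_one_eq_nil]
  | succ k ih =>
    intro imgs f
    have hr : PySem.List.pyRange 0 ((k : Int) + 1) 1
        = PySem.List.pyRange 0 (k : Int) 1 ++ [(k : Int)] :=
      PySem.List.pyRange_one_succ_right (by positivity)
    have hrep : List.replicate (k + 1) (none : Option Char)
        = List.replicate k (none : Option Char) ++ [none] := by
      simp [List.replicate_succ']
    push_cast
    rw [hr, List.foldl_append, ih imgs f, hrep, PySem.List.enumerate_append]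
    simp [PySem.List.enumerate, pvBRender, pvIsDarkSquare]
    omega


theorem pvA_empty_loop (r : Int) (v : Int) (imgs : List String) (f : Int) :
    (PySem.List.pyRange 0 v 1).foldl
        (fun st (_ : Int) =>
          let is_dark := pvIsDarkSquare st.2 r
          let filename := if is_dark then "ed.png" else "el.png"
          (st.1 ++ [filename], st.2 + 1)) (imgs, f)
      = (imgs ++ (PySem.List.enumerate (List.replicate v.toNat (none : Option Char)) f).map (pvBRender r),
         f + v.toNat) := by
  rw [pvPyRange_toNat]; exact pvA_empty_loop_nat r v.toNat imgs f

-- A's inner character loop = B's expand-then-render on the same suffix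
theorem pvA_inner (r : Int) (cs : List Char) :
    ∀ (imgs : List String) (f : Int),
      cs.foldl (pvAStep r) (imgs, f)
      = (imgs ++ (PySem.List.enumerate (cs.flatMap pvCellsOf) f).map (pvBRender r),
         f + (cs.flatMap pvCellsOf).length) := by
  induction cs with
  | nil => intro imgs f; simp
  | cons c cs ih =>
    intro imgs f
    rw [List.foldl_cons]
    by_cases hd : PySem.Chars.isdigit c
    · have hstep : pvAStep r (imgs, f) c
          = (imgs ++ (PySem.List.enumerate (pvCellsOf c) f).map (pvBRender r),
             f + (pvCellsOf c).length) := by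
        simp only [pvAStep, hd, if_pos, pvCellsOf]
        rw [pvA_empty_loop]
        simp
      rw [hstep, ih]
      rw [List.flatMap_cons, PySem.List.enumerate_append, List.map_append, List.append_assoc,
        List.length_append]
      simp only [Prod.mk.injEq]
      exact ⟨trivial, by push_cast; ring⟩
    · by_cases ha : PySem.Chars.isalpha c
      · have hstep : pvAStep r (imgs, f) c
            = (imgs ++ (PySem.List.enumerate (pvCellsOf c) f).map (pvBRender r),
               f + (pvCellsOf c).length) := by
          simp only [pvAStep, hd, ha, pvCellsOf]
          simp [PySem.List.enumerate, pvBRender, pvIsDarkSquare]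
        rw [hstep, ih]
        rw [List.flatMap_cons, PySem.List.enumerate_append, List.map_append, List.append_assoc,
          List.length_append]
        simp only [Prod.mk.injEq]
        exact ⟨trivial, by push_cast; ring⟩
      · rw [show pvAStep r (imgs, f) c = (imgs, f) by simp [pvAStep, hd, ha]]
        rw [ih]
        simp [pvCellsOf, hd, ha]

-- A's outer rank loop = B's per-row rendering, with rank index 7 - row number
theorem pvA_outer (ranks : List String) :
    ∀ (grid : List (List String)) (r : Int),
      (ranks.foldl
        (fun (acc : List (List String) × Int) rank_fen_string =>
          let rank_images := (rank_fen_string.toList.foldl (pvAStep acc.2) ([], 0)).1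
          (acc.1 ++ [rank_images], acc.2 - 1)) (grid, r)).1
      = grid ++ (PySem.List.enumerate ranks (7 - r)).map (fun rowp =>
          (PySem.List.enumerate (rowp.2.toList.flatMap pvCellsOf) 0).map (pvBRender (7 - rowp.1))) := by
  induction ranks with
  | nil => intro grid r; simp
  | cons rk ranks ih =>
    intro grid r
    rw [List.foldl_cons, PySem.List.enumerate_cons]
    simp only
    rw [ih]
    rw [pvA_inner r rk.toList [] 0]
    have h78 : 7 - (r - 1) = (7 - r) + 1 := by ring
    rw [h78]
    simp

-- enumerating a mapped list = mapping over the enumerated list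
theorem pvEnumerate_map {α β : Type} (g : α → β) (xs : List α) :
    ∀ s : Int, PySem.List.enumerate (xs.map g) s
      = (PySem.List.enumerate xs s).map (fun p => (p.1, g p.2)) := by
  induction xs with
  | nil => intro s; simp
  | cons x xs ih =>
    intro s
    rw [List.map_cons, PySem.List.enumerate_cons, PySem.List.enumerate_cons, ih, List.map_cons]

-- ===== VERDICT (by name: the statement is the Claim_ definition above) =====
theorem generate_image_grid_standalone_spec : Claim_equal_generate_image_grid_standalone := by
  intro fen _
  unfold Spec_generate_image_grid_standalone
  unfold generate_image_grid_standalone generate_image_grid_standalone_alt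
  simp only
  rw [pvA_outer]
  simp only [pvBExpand_eq, pvEnumerate_map, List.map_map]
  rfl
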